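-- pv_equiv track=rewrite | github.com/rfnry/rag | packages/python/src/rfnry_rag/retrieval/tests/test_baml_prompt_domain_agnostic.py | _extract_prompt_bodies
-- ===== SOURCE A (Python) =====
-- def _extract_prompt_bodies(text: str) -> list[str]:
--     """Yield each #" ... "# block from a .baml file."""
--     out: list[str] = []
--     i = 0
--     while True:
--         start = text.find('#"', i)
--         if start == -1:
--             break
--         end = text.find('"#', start + 2)
--         if end == -1:
--             break
--         out.append(text[start + 2 : end])
--         i = end + 2
--     return out
-- ===== SOURCE B (Python) =====
-- def _extract_prompt_bodies(text: str) -> list[str]: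
--     """Yield each #" ... "# block from a .baml file (single-pass state machine)."""
--     out: list[str] = []
--     buf: list[str] = []
--     inside = False
--     i = 0
--     n = len(text)
--     while i < n:
--         two = text[i:i + 2]
--         if not inside:
--             if two == '#"':
--                 inside = True
--                 buf = []
--                 i += 2
--             else:
--                 i += 1
--         else:
--             if two == '"#':
--                 out.append(''.join(buf))
--                 inside = False
--                 i += 2
--             else:
--                 buf.append(text[i])
--                 i += 1
--     return out
-- ===== Notes on version B (the rewrite author's own statement) =====
-- stated objective: alternative
-- what changed: Replaced A's loop of repeated str.find substring searches with index bookkeeping by a single left-to-right character scan driven by an inside/outside state machine that accumulates the current block body in a buffer.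
import Mathlib
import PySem

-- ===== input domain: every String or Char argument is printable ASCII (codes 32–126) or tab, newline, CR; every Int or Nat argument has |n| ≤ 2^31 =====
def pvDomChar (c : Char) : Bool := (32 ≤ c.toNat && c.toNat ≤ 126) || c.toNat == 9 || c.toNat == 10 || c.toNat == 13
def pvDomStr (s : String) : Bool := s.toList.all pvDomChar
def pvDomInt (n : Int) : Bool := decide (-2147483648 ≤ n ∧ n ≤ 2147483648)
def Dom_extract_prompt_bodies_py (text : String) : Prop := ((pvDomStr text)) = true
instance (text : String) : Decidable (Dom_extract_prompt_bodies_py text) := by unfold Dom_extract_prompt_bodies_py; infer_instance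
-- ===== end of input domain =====

-- B replaces A's repeated str.find loop by a single-pass inside/outside state machine; return values proved equal on all inputs.


-- ===== PORT A =====
-- A's `while True` loop; i strictly grows by ≥ 4 per iteration so fuel = length + 1 always suffices
-- (established in pvLoopA_eq_scan below).  text.find(sub, i) = PySem.Chars.findFrom on code points,
-- text[a:b] = PySem.List.slice; the appended Python str is rebuilt with String.ofList.
def pvLoopA (l : List Char) : Nat → Nat → List String → List String
  | 0, _, out => out
  | fuel + 1, i, out =>
    let start := PySem.Chars.findFrom l ['#', '"'] (i : Int) none
    if start = -1 then out
    else
      let e := PySem.Chars.findFrom l ['"', '#'] (start + 2) none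
      if e = -1 then out
      else pvLoopA l fuel (e.toNat + 2)
             (out ++ [String.ofList (PySem.List.slice l (some (start + 2)) (some e))])

def extract_prompt_bodies_py (text : String) : List String :=
  pvLoopA text.toList (text.toList.length + 1) 0 []

-- ===== PORT B =====
-- single pass; state `inside : Bool`, `buf` = body collected so far, `out` = finished bodies
def pvScanB : List Char → Bool → List Char → List String → List String
  | c1 :: c2 :: rest, false, buf, out =>
      if c1 = '#' ∧ c2 = '"' then pvScanB rest true [] out
      else pvScanB (c2 :: rest) false buf out
  | c1 :: c2 :: rest, true, buf, out =>
      if c1 = '"' ∧ c2 = '#' then pvScanB rest false [] (out ++ [String.ofList buf])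
      else pvScanB (c2 :: rest) true (buf ++ [c1]) out
  | [_], _, _, out => out
  | [], _, _, out => out
termination_by l _ _ _ => l.length

def extract_prompt_bodies_py_alt (text : String) : List String :=
  pvScanB text.toList false [] []

-- ===== PRECONDITION & SPEC =====
def Spec_extract_prompt_bodies_py (text : String) (out : List String) : Prop := out = extract_prompt_bodies_py_alt text
instance (text : String) (out : List String) : Decidable (Spec_extract_prompt_bodies_py text out) := by unfold Spec_extract_prompt_bodies_py; infer_instance

-- ===== CLAIM (what is proved, stated in full; the proofs are below) =====
def Claim_equal_extract_prompt_bodies_py : Prop := ∀ (text : String), Dom_extract_prompt_bodies_py text → Spec_extract_prompt_bodies_py text (extract_prompt_bodies_py text)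

-- ===== LEMMAS AND PROOFS =====

-- outside state: no opener anywhere → the scan falls through and returns out
theorem pvScanB_no_open (l : List Char) (buf : List Char) (out : List String)
    (h : ¬ ['#', '"'] <:+: l) : pvScanB l false buf out = out := by
  induction l with
  | nil => simp [pvScanB]
  | cons c l ih =>
    cases l with
    | nil => simp [pvScanB]
    | cons c2 rest =>
      rw [pvScanB, if_neg]
      · exact ih (fun hin => h (List.infix_cons hin))
      · rintro ⟨rfl, rfl⟩
        exact h (List.IsPrefix.isInfix ⟨rest, rfl⟩)

-- inside state: no closer anywhere → the scan falls through and returns out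
theorem pvScanB_no_close (l : List Char) (buf : List Char) (out : List String)
    (h : ¬ ['"', '#'] <:+: l) : pvScanB l true buf out = out := by
  induction l generalizing buf with
  | nil => simp [pvScanB]
  | cons c l ih =>
    cases l with
    | nil => simp [pvScanB]
    | cons c2 rest =>
      rw [pvScanB, if_neg]
      · exact ih (buf ++ [c]) (fun hin => h (List.infix_cons hin))
      · rintro ⟨rfl, rfl⟩
        exact h (List.IsPrefix.isInfix ⟨rest, rfl⟩)

-- outside state: first opener starts at position j → scan jumps past it into inside state
theorem pvScanB_open (j : Nat) (l : List Char) (buf : List Char) (out : List String)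
    (hpre : ['#', '"'] <+: l.drop j) (hmin : ∀ m < j, ¬ ['#', '"'] <+: l.drop m) :
    pvScanB l false buf out = pvScanB (l.drop (j + 2)) true [] out := by
  induction j generalizing l with
  | zero =>
    obtain ⟨t, ht⟩ := hpre
    simp only [List.drop_zero] at ht
    subst ht
    simp only [List.cons_append, List.nil_append]
    rw [pvScanB, if_pos ⟨rfl, rfl⟩]
    simp
  | succ j ih =>
    match l with
    | [] => simp at hpre
    | [c] => simp [List.drop_succ_cons] at hpre
    | c :: c2 :: rest =>
      rw [pvScanB, if_neg]
      · have := ih (c2 :: rest) hpre (fun m hm => hmin (m + 1) (by omega))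
        simpa using this
      · rintro ⟨rfl, rfl⟩
        exact hmin 0 (by omega) ⟨rest, rfl⟩

-- inside state: first closer starts at position j → body = buf ++ take j, back to outside state
theorem pvScanB_close (j : Nat) (l : List Char) (buf : List Char) (out : List String)
    (hpre : ['"', '#'] <+: l.drop j) (hmin : ∀ m < j, ¬ ['"', '#'] <+: l.drop m) :
    pvScanB l true buf out = pvScanB (l.drop (j + 2)) false [] (out ++ [String.ofList (buf ++ l.take j)]) := by
  induction j generalizing l buf with
  | zero =>
    obtain ⟨t, ht⟩ := hpre
    simp only [List.drop_zero] at ht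
    subst ht
    simp only [List.cons_append, List.nil_append]
    rw [pvScanB, if_pos ⟨rfl, rfl⟩]
    simp
  | succ j ih =>
    match l with
    | [] => simp at hpre
    | [c] => simp [List.drop_succ_cons] at hpre
    | c :: c2 :: rest =>
      rw [pvScanB, if_neg]
      · have := ih (c2 :: rest) (buf ++ [c]) hpre (fun m hm => hmin (m + 1) (by omega))
        simpa [List.append_assoc] using this
      · rintro ⟨rfl, rfl⟩
        exact hmin 0 (by omega) ⟨rest, rfl⟩

theorem pvLoopA_eq_scan (l : List Char) (fuel i : Nat) (out : List String)
    (hi : i ≤ l.length) (hfuel : l.length - i < 4 * fuel) :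
    pvLoopA l fuel i out = pvScanB (l.drop i) false [] out := by
  induction fuel generalizing i out with
  | zero => omega
  | succ fuel ih =>
    rw [pvLoopA]
    rw [PySem.Chars.findFrom_natCast l ['#', '"'] i hi]
    by_cases h1 : PySem.Chars.find (l.drop i) ['#', '"'] = -1
    · rw [if_pos (by simp [h1])]
      exact (pvScanB_no_open _ _ _ ((PySem.Chars.find_eq_neg_one_iff _ _).mp h1)).symm
    · have hf1 : 0 ≤ PySem.Chars.find (l.drop i) ['#', '"'] := by
        have := PySem.Chars.neg_one_le_find (l.drop i) ['#', '"']
        omega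
      set f1 := PySem.Chars.find (l.drop i) ['#', '"'] with hf1def
      obtain ⟨hpre1, hmin1⟩ := PySem.Chars.find_spec (s := l.drop i) (sub := ['#', '"']) hf1
      set j := f1.toNat with hjdef
      have hjf : f1 = (j : Int) := (Int.toNat_of_nonneg hf1).symm
      rw [hjf]
      have hne1 : ¬((j : Int) = -1) := by omega
      simp only [if_neg hne1]
      rw [if_neg (show ¬((i : Int) + (j : Int) = -1) by omega)]
      have hlen1 : i + j + 2 ≤ l.length := by
        have h2le : 2 ≤ ((l.drop i).drop j).length := hpre1.length_le
        simp [List.length_drop] at h2le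
        omega
      have hcast : (i : Int) + (j : Int) + 2 = ((i + j + 2 : Nat) : Int) := by push_cast; ring
      rw [hcast, PySem.Chars.findFrom_natCast l ['"', '#'] (i + j + 2) hlen1]
      by_cases h2 : PySem.Chars.find (l.drop (i + j + 2)) ['"', '#'] = -1
      · rw [if_pos (by simp [h2])]
        rw [pvScanB_open j (l.drop i) [] out hpre1 hmin1]
        have : (l.drop i).drop (j + 2) = l.drop (i + j + 2) := by rw [List.drop_drop]; ring_nf
        rw [this]
        exact (pvScanB_no_close _ _ _ ((PySem.Chars.find_eq_neg_one_iff _ _).mp h2)).symm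
      · have hf2 : 0 ≤ PySem.Chars.find (l.drop (i + j + 2)) ['"', '#'] := by
          have := PySem.Chars.neg_one_le_find (l.drop (i + j + 2)) ['"', '#']
          omega
        set f2 := PySem.Chars.find (l.drop (i + j + 2)) ['"', '#'] with hf2def
        obtain ⟨hpre2, hmin2⟩ := PySem.Chars.find_spec (s := l.drop (i + j + 2)) (sub := ['"', '#']) hf2
        set k := f2.toNat with hkdef
        have hkf : f2 = (k : Int) := (Int.toNat_of_nonneg hf2).symm
        rw [hkf]
        have hne2 : ¬((k : Int) = -1) := by omega
        simp only [if_neg hne2]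
        rw [if_neg (show ¬(((i + j + 2 : Nat) : Int) + (k : Int) = -1) by omega)]
        have hlen2 : i + j + 2 + k + 2 ≤ l.length := by
          have h2le : 2 ≤ ((l.drop (i + j + 2)).drop k).length := hpre2.length_le
          simp [List.length_drop] at h2le
          omega
        have htonat : (((i + j + 2 : Nat) : Int) + (k : Int)).toNat = i + j + 2 + k := by omega
        rw [htonat]
        rw [PySem.List.slice_natCast_add l (i + j + 2) k]
        rw [ih (i + j + 2 + k + 2) _ (by omega) (by omega)]
        rw [pvScanB_open j (l.drop i) [] out hpre1 hmin1]
        have hd1 : (l.drop i).drop (j + 2) = l.drop (i + j + 2) := by rw [List.drop_drop]; ring_nf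
        rw [hd1]
        rw [pvScanB_close k (l.drop (i + j + 2)) [] out hpre2 hmin2]
        have hd2 : (l.drop (i + j + 2)).drop (k + 2) = l.drop (i + j + 2 + k + 2) := by
          rw [List.drop_drop]; ring_nf
        rw [hd2]
        simp

-- ===== VERDICT (by name: the statement is the Claim_ definition above) =====
theorem extract_prompt_bodies_py_spec : Claim_equal_extract_prompt_bodies_py := by
  intro text _
  unfold Spec_extract_prompt_bodies_py extract_prompt_bodies_py extract_prompt_bodies_py_alt
  rw [pvLoopA_eq_scan _ _ _ _ (Nat.zero_le _) (by omega)]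
  simp
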